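-- pv_equiv track=rewrite | github.com/BrianPugh/game-and-watch-retro-go | parse_roms.py | is_valid_game_genie_code
-- ===== SOURCE A (Python) =====
-- def is_valid_game_genie_code(code):
--     if '+' in code:
--         subcodes = code.split('+')
--         if len(subcodes) > 3:
--             return False
--         for subcode in subcodes:
--             if not is_valid_game_genie_code(subcode):
--                 return False
--         return True
--
--     valid_characters = "APZLGITYEOXUKSVN"
--     if all(c in valid_characters for c in code) == False:
--         return False
--     if len(code) != 6 and len(code) != 8:
--         return False
--
--     return True
-- ===== SOURCE B (Python) =====
-- def is_valid_game_genie_code(code):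
--     # Flat: always split on '+', check piece count, then validate each piece once.
--     subcodes = code.split('+')
--     if len(subcodes) > 3:
--         return False
--     return all(
--         len(s) in (6, 8) and all(c in "APZLGITYEOXUKSVN" for c in s)
--         for s in subcodes
--     )
-- ===== Notes on version B (the rewrite author's own statement) =====
-- stated objective: simpler
-- what changed: Replaces A's recursive structure (base-case validator plus split-and-recurse on the separator) with a single flat pass: always split on the separator, check the piece count, then validate each piece's length and characters in one loop.
import Mathlib
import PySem

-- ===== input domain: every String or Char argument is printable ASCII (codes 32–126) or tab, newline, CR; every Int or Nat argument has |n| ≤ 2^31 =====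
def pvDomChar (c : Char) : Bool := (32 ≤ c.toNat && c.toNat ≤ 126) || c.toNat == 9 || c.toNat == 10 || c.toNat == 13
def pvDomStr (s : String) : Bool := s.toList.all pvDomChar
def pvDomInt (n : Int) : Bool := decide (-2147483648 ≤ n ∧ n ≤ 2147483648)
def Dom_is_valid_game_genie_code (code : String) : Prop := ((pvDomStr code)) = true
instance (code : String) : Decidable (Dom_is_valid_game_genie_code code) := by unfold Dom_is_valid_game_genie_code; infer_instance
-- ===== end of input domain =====

-- B replaces A's shallow recursion (split, then recurse on each separator-free piece) by one
-- flat pass: always split on the separator and validate every piece in a single loop (objective: simpler).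

-- ===== PORT A =====
-- pieces of a split on '+' contain no '+' (needed for the port's termination)
theorem ggA_go_no_plus (fuel : Nat) (l cur : List Char) (acc : List (List Char))
    (hl : l.length < fuel) (hcur : '+' ∉ cur) (hacc : ∀ q ∈ acc, '+' ∉ q) :
    ∀ p ∈ PySem.Chars.splitOn.go ['+'] fuel l cur acc, '+' ∉ p := by
  induction fuel generalizing l cur acc with
  | zero => omega
  | succ fuel ih =>
    cases l with
    | nil =>
      intro p hp
      simp only [PySem.Chars.splitOn.go] at hp
      rw [List.mem_reverse, List.mem_cons] at hp
      rcases hp with h | h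
      · subst h; simpa using hcur
      · exact hacc p h
    | cons c rest =>
      intro p hp
      simp only [PySem.Chars.splitOn.go, List.isPrefixOf, Bool.and_true] at hp
      by_cases hc : ('+' == c) = true
      · rw [if_pos hc] at hp
        refine ih (List.drop 1 (c :: rest)) [] (cur.reverse :: acc) (by simp at hl ⊢; omega)
          (by simp) ?_ p hp
        intro q hq
        rcases List.mem_cons.mp hq with h | h
        · subst h; simpa using hcur
        · exact hacc q h
      · rw [if_neg hc] at hp
        refine ih rest (c :: cur) acc (by simp at hl ⊢; omega) ?_ hacc p hp
        intro h
        rcases List.mem_cons.mp h with h | h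
        · exact hc (by rw [beq_iff_eq]; exact h)
        · exact hcur h

theorem splitOn_no_plus (cs : List Char) :
    ∀ p ∈ PySem.Chars.splitOn cs ['+'], '+' ∉ p := by
  intro p hp
  exact ggA_go_no_plus (cs.length + 1) cs [] [] (by omega) (by simp) (by simp) p hp

-- transliteration of A on the char list (recursion exactly as in the Python)
def ggA (cs : List Char) : Bool :=
  if h : PySem.Chars.isIn ['+'] cs = true then
    let subcodes := PySem.Chars.splitOn cs ['+']
    if 3 < subcodes.length then false
    else subcodes.attach.all (fun x => ggA x.1)
  else
    if (cs.all (fun c => PySem.Chars.isIn [c] "APZLGITYEOXUKSVN".toList)) == false then false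
    else if cs.length ≠ 6 ∧ cs.length ≠ 8 then false
    else true
termination_by cs.count '+'
decreasing_by
  have hnp : '+' ∉ x.1 := splitOn_no_plus cs x.1 x.2
  have h1 : x.1.count '+' = 0 := List.count_eq_zero.mpr hnp
  have h2 : '+' ∈ cs := (List.singleton_infix_iff '+' cs).mp ((PySem.Chars.isIn_iff_infix _ _).mp h)
  have h3 : 0 < cs.count '+' := List.count_pos_iff.mpr h2
  omega

def is_valid_game_genie_code (code : String) : Bool := ggA code.toList

-- ===== PORT B =====
def ggB (cs : List Char) : Bool :=
  let subcodes := PySem.Chars.splitOn cs ['+']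
  if 3 < subcodes.length then false
  else subcodes.all (fun s =>
    (s.length == 6 || s.length == 8) &&
    s.all (fun c => PySem.Chars.isIn [c] "APZLGITYEOXUKSVN".toList))

def is_valid_game_genie_code_alt (code : String) : Bool := ggB code.toList

-- ===== PRECONDITION & SPEC =====
def Spec_is_valid_game_genie_code (code : String) (out : Bool) : Prop := out = is_valid_game_genie_code_alt code
instance (code : String) (out : Bool) : Decidable (Spec_is_valid_game_genie_code code out) := by unfold Spec_is_valid_game_genie_code; infer_instance

-- ===== CLAIM (what is proved, stated in full; the proofs are below) =====
def Claim_equal_is_valid_game_genie_code : Prop := ∀ (code : String), Dom_is_valid_game_genie_code code → Spec_is_valid_game_genie_code code (is_valid_game_genie_code code)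

-- ===== LEMMAS AND PROOFS =====

-- splitting a '+'-free list is the identity
theorem go_of_no_plus (fuel : Nat) (l cur : List Char) (acc : List (List Char))
    (hl : '+' ∉ l) :
    PySem.Chars.splitOn.go ['+'] fuel l cur acc = ((cur.reverse ++ l) :: acc).reverse := by
  induction fuel generalizing l cur with
  | zero => simp [PySem.Chars.splitOn.go]
  | succ fuel ih =>
    cases l with
    | nil => simp [PySem.Chars.splitOn.go]
    | cons c rest =>
      have hc : c ≠ '+' := fun h => hl (h ▸ List.mem_cons_self)
      simp only [PySem.Chars.splitOn.go, List.isPrefixOf, Bool.and_true]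
      rw [if_neg (by simp; exact fun h => hc h.symm)]
      rw [ih rest (c :: cur) (fun h => hl (List.mem_cons_of_mem _ h))]
      simp

theorem splitOn_of_no_plus (cs : List Char) (h : '+' ∉ cs) :
    PySem.Chars.splitOn cs ['+'] = [cs] := by
  unfold PySem.Chars.splitOn
  rw [go_of_no_plus _ _ _ _ h]
  simp

-- A's base branch equals B's per-piece check, for a '+'-free piece
theorem ggA_base (cs : List Char) (h : PySem.Chars.isIn ['+'] cs = false) :
    ggA cs = ((cs.length == 6 || cs.length == 8) &&
      cs.all (fun c => PySem.Chars.isIn [c] "APZLGITYEOXUKSVN".toList)) := by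
  rw [ggA]
  rw [dif_neg (by simp [h])]
  cases hall : cs.all (fun c => PySem.Chars.isIn [c] "APZLGITYEOXUKSVN".toList) with
  | false => simp
  | true =>
    simp only [Bool.and_true]
    by_cases h6 : cs.length = 6
    · simp [h6]
    · by_cases h8 : cs.length = 8
      · simp [h8]
      · simp [h6, h8]

theorem ggA_eq_ggB (cs : List Char) : ggA cs = ggB cs := by
  by_cases h : PySem.Chars.isIn ['+'] cs = true
  · rw [ggA, dif_pos h]
    unfold ggB
    by_cases hlen : 3 < (PySem.Chars.splitOn cs ['+']).length
    · simp [hlen]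
    · simp only [hlen, ite_false]
      rw [Bool.eq_iff_iff, List.all_eq_true, List.all_eq_true]
      constructor
      · intro hall s hs
        have := hall ⟨s, hs⟩ (List.mem_attach _ _)
        rwa [ggA_base s ((PySem.Chars.isIn_eq_false_iff _ _).mpr
          (fun hinf => splitOn_no_plus cs s hs ((List.singleton_infix_iff '+' s).mp hinf)))] at this
      · intro hall x _
        rw [ggA_base x.1 ((PySem.Chars.isIn_eq_false_iff _ _).mpr
          (fun hinf => splitOn_no_plus cs x.1 x.2 ((List.singleton_infix_iff '+' x.1).mp hinf)))]
        exact hall x.1 x.2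
  · have hnp : '+' ∉ cs := fun hm =>
      h ((PySem.Chars.isIn_iff_infix _ _).mpr ((List.singleton_infix_iff '+' cs).mpr hm))
    rw [ggA_base cs (by simpa using h)]
    unfold ggB
    rw [splitOn_of_no_plus cs hnp]
    simp

-- ===== VERDICT (by name: the statement is the Claim_ definition above) =====
theorem is_valid_game_genie_code_spec : Claim_equal_is_valid_game_genie_code := by
  intro code _
  unfold Spec_is_valid_game_genie_code is_valid_game_genie_code is_valid_game_genie_code_alt
  exact ggA_eq_ggB code.toList
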